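-- pv_equiv track=rewrite | github.com/thoffert05/Advanced_Database_Project | python_ingrstion_scripts_for_VM/ingest_file.py | spark_safe_string
-- ===== SOURCE A (Python) =====
-- import unicodedata
--
-- def spark_safe_string(s: str) -> str:
--     #if no string is given then return an empty string
--     if s is None:
--         return ""
--     #normalize unicode to fix multibyte sequences
--     s = unicodedata.normalize("NFKC", s)
--     #stores characters that have 0 width
--     ZERO_WIDTH = [
--         '\u200b', '\u200c', '\u200d', '\u200e', '\u200f',
--         '\ufeff'
--     ]
--     #for each zero width character
--     for zw in ZERO_WIDTH:
--         #if it is in the string remove all occurences of it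
--         s = s.replace(zw, '')
--     #make sure the character is printable and not a tab or new line
--     s = ''.join(ch for ch in s if ch.isprintable() or ch in ('\t', '\n'))
--     #remove any null bytes
--     s = s.replace('\x00', '')
--     #strip leading and trailing white space
--     s = s.strip()
--     #return the cleaned string
--     return s
-- ===== SOURCE B (Python) =====
-- import unicodedata
--
-- def spark_safe_string(s: str) -> str:
--     if s is None:
--         return ""
--     # one pass: keep only printable chars (plus tab/newline); zero-width
--     # and null chars are non-printable, so they are dropped by the same test
--     kept = [ch for ch in unicodedata.normalize("NFKC", s)
--             if ch.isprintable() or ch in '\t\n']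
--     return ''.join(kept).strip()
-- ===== Notes on version B (the rewrite author's own statement) =====
-- stated objective: simpler
-- what changed: Replaces A's four sequential string passes (zero-width replace loop, printable filter, null-byte replace, strip) with a single keep-predicate pass followed by strip, since zero-width and null characters are non-printable and are dropped by the same test.
import Mathlib
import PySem

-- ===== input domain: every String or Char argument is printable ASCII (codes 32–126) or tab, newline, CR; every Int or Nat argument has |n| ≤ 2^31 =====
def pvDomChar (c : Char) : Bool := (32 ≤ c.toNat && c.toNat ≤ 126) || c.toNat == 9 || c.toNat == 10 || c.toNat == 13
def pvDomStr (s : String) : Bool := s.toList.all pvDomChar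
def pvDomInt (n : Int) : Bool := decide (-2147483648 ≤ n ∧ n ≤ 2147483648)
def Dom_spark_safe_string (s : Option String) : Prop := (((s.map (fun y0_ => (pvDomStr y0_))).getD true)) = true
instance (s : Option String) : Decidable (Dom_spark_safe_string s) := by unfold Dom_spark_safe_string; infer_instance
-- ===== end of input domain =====

-- B fuses A's zero-width replace loop, printable filter and null-byte replace into one
-- keep-predicate pass (objective: simpler); NFKC normalization is the identity on the
-- printable-ASCII/tab/newline/CR domain and is ported as such (exact there).

-- ===== PORT A =====
-- ch.isprintable(): exact for code points below 128 (the stated ASCII domain)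
def pyIsprintable (c : Char) : Bool := 32 ≤ c.toNat && c.toNat ≤ 126

def sparkZeroWidth : List String :=
  ["\u200b", "\u200c", "\u200d", "\u200e", "\u200f", "\ufeff"]

-- the generator's condition: ch.isprintable() or ch in ('\t', '\n')
def sparkKeepA (c : Char) : Bool := pyIsprintable c || c == '\t' || c == '\n'

def spark_safe_string (s : Option String) : String :=
  match s with
  | none => ""
  | some s0 =>
    -- unicodedata.normalize("NFKC", s): identity on the printable-ASCII domain (exact there)
    let s1 := s0
    -- for zw in ZERO_WIDTH: s = s.replace(zw, '')
    let s2 := sparkZeroWidth.foldl (fun t zw => PySem.Str.replace t zw "") s1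
    -- s = ''.join(ch for ch in s if ch.isprintable() or ch in ('\t','\n'))
    let s3 := String.ofList (s2.toList.filter sparkKeepA)
    -- s = s.replace('\x00', '')
    let s4 := PySem.Str.replace s3 "\x00" ""
    -- s = s.strip()
    PySem.Str.strip s4

-- ===== PORT B =====
-- ch.isprintable() or ch in '\t\n'  (isprintable exact for code points below 128)
def altKeep (c : Char) : Bool := 32 ≤ c.toNat && c.toNat ≤ 126 || c == '\t' || c == '\n'

def spark_safe_string_alt (s : Option String) : String :=
  match s with
  | none => ""
  | some s0 => PySem.Str.strip (String.ofList (s0.toList.filter altKeep))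

-- ===== PRECONDITION & SPEC =====
def Spec_spark_safe_string (s : Option String) (out : String) : Prop := out = spark_safe_string_alt s
instance (s : Option String) (out : String) : Decidable (Spec_spark_safe_string s out) := by unfold Spec_spark_safe_string; infer_instance

-- ===== CLAIM (what is proved, stated in full; the proofs are below) =====
def Claim_equal_spark_safe_string : Prop := ∀ (s : Option String), Dom_spark_safe_string s → Spec_spark_safe_string s (spark_safe_string s)

-- ===== LEMMAS AND PROOFS =====

-- replace.go with a single-char pattern and empty replacement is a filter
lemma go_single (c : Char) (l : List Char) : ∀ (acc : List Char) (fuel : Nat), l.length ≤ fuel →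
    PySem.Chars.replace.go [c] [] fuel l acc = acc.reverse ++ l.filter (· ≠ c) := by
  induction l with
  | nil => intro acc fuel _; cases fuel <;> simp [PySem.Chars.replace.go]
  | cons x t ih =>
    intro acc fuel h
    cases fuel with
    | zero => simp at h
    | succ fuel =>
      rw [PySem.Chars.replace.go]
      by_cases hx : x = c
      · subst hx
        simp [List.isPrefixOf, ih acc fuel (by simpa using h)]
      · have hp : [c].isPrefixOf (x :: t) = false := by
          simp [List.isPrefixOf]; exact fun hh => (hx hh.symm).elim
        simp [hp, ih (x :: acc) fuel (by simpa using h), hx]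

-- s.replace(c, '') on the char level is List.filter (· ≠ c)
lemma replace_single (cs : List Char) (c : Char) :
    PySem.Chars.replace cs [c] [] = cs.filter (· ≠ c) := by
  rw [PySem.Chars.replace]
  simp [go_single c cs [] cs.length le_rfl]

-- removing a char the keep-filter drops anyway changes nothing (before the filter)
lemma filter_keep_filter_ne (p : Char → Bool) (c : Char) (hc : p c = false) (l : List Char) :
    (l.filter (· ≠ c)).filter p = l.filter p := by
  rw [List.filter_filter]
  apply List.filter_congr
  intro a _
  by_cases h : a = c
  · subst h; simp [hc]
  · simp [h]

-- ... and after the filter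
lemma filter_ne_filter_keep (p : Char → Bool) (c : Char) (hc : p c = false) (l : List Char) :
    (l.filter p).filter (· ≠ c) = l.filter p := by
  rw [List.filter_filter]
  apply List.filter_congr
  intro a _
  by_cases h : a = c
  · subst h; simp [hc]
  · simp [h]

lemma repl_toList (zws : String) (zw : Char) (h : zws.toList = [zw]) (s : String) :
    (PySem.Str.replace s zws "").toList = s.toList.filter (· ≠ zw) := by
  rw [PySem.Str.toList_replace, h, show ("" : String).toList = [] by decide, replace_single]

lemma spark_list_eq (s0 : String) :
    (PySem.Str.replace
        (String.ofList
          (((sparkZeroWidth.foldl (fun t zw => PySem.Str.replace t zw "") s0)).toList.filter sparkKeepA))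
        "\x00" "").toList
      = s0.toList.filter altKeep := by
  simp only [sparkZeroWidth, List.foldl]
  rw [repl_toList "\x00" '\x00' (by decide), String.toList_ofList,
      repl_toList "\ufeff" '\ufeff' (by decide),
      repl_toList "\u200f" '\u200f' (by decide),
      repl_toList "\u200e" '\u200e' (by decide),
      repl_toList "\u200d" '\u200d' (by decide),
      repl_toList "\u200c" '\u200c' (by decide),
      repl_toList "\u200b" '\u200b' (by decide)]
  rw [filter_ne_filter_keep _ _ (by decide),
      filter_keep_filter_ne _ _ (by decide),
      filter_keep_filter_ne _ _ (by decide),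
      filter_keep_filter_ne _ _ (by decide),
      filter_keep_filter_ne _ _ (by decide),
      filter_keep_filter_ne _ _ (by decide),
      filter_keep_filter_ne _ _ (by decide)]
  have h : sparkKeepA = altKeep := by
    funext c; simp [sparkKeepA, altKeep, pyIsprintable]
  rw [h]

-- ===== VERDICT (by name: the statement is the Claim_ definition above) =====
theorem spark_safe_string_spec : Claim_equal_spark_safe_string := by
  intro s _
  unfold Spec_spark_safe_string
  cases s with
  | none => rfl
  | some s0 =>
    simp only [spark_safe_string, spark_safe_string_alt]
    exact congrArg PySem.Str.strip
      (String.toList_inj.mp (by rw [spark_list_eq s0, String.toList_ofList]))
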